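-- pv_equiv track=rewrite | github.com/jaehyeon2/python_codingtest | search/7-3.py | cutting
-- ===== SOURCE A (Python) =====
-- def cutting(array, target, start, end):
--     while start<=end:
--         total=0
--         mid = (start+end)//2
--         for i in array:
--             if i>mid:
--                 total+=(i-mid)
--         if total==target:
--             return mid
--         elif total>target:
--             start=mid+1
--         else:
--             end=mid-1
-- ===== SOURCE B (Python) =====
-- def cutting(array, target, start, end):
--     # Same binary search over cut heights, but the inner scan is replaced by
--     # a one-time sort + suffix sums and a bisection per probe.
--     arr = sorted(array)
--     n = len(arr)
--     suf = [0] * (n + 1)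
--     for k in range(n - 1, -1, -1):
--         suf[k] = suf[k + 1] + arr[k]
--     while start <= end:
--         mid = (start + end) // 2
--         lo, hi = 0, n
--         while lo < hi:
--             m = (lo + hi) // 2
--             if arr[m] <= mid:
--                 lo = m + 1
--             else:
--                 hi = m
--         total = suf[lo] - (n - lo) * mid
--         if total == target:
--             return mid
--         elif total > target:
--             start = mid + 1
--         else:
--             end = mid - 1
--     return None
-- ===== Notes on version B (the rewrite author's own statement) =====
-- stated objective: alternative
-- what changed: B precomputes sorted(array) with suffix sums once and answers each binary-search probe's cut total by a bisection instead of A's full rescan of the array per probe.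
import Mathlib
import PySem

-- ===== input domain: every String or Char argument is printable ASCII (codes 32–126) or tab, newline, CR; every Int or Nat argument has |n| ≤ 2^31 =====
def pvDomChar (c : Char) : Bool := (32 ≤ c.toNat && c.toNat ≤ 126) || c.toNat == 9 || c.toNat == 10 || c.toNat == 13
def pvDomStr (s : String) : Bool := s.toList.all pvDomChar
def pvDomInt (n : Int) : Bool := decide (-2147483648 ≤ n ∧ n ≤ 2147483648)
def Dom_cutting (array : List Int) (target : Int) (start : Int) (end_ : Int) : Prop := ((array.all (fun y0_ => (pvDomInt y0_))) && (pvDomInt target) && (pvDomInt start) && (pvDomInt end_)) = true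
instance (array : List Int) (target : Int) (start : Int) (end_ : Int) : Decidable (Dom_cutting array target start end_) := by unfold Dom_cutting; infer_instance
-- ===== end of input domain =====

-- B replaces A's rescan of the whole array at every binary-search probe by a one-time
-- sort + suffix-sum table and a bisection per probe; same result everywhere.

-- ===== PORT A =====
def cutting (array : List Int) (target : Int) (start : Int) (end_ : Int) : Option Int :=
  if _h : start ≤ end_ then
    let mid := PySem.Int.floordiv (start + end_) 2
    let total := array.foldl (fun t i => if i > mid then t + (i - mid) else t) 0
    if total = target then some mid
    else if total > target then cutting array target (mid + 1) end_
    else cutting array target start (mid - 1)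
  else none
termination_by (end_ - start + 1).toNat
decreasing_by
  · have hb := PySem.Int.floordiv_two_mid_bounds _h; omega
  · have hb := PySem.Int.floordiv_two_mid_bounds _h; omega

-- ===== PORT B =====
-- suffix-sum table of Source B: suf[k] = arr[k] + arr[k+1] + ... (built back-to-front)
def sufList : List Int → List Int
  | [] => [0]
  | a :: t => (a + (sufList t).headD 0) :: sufList t

-- the hand-written bisect_right lo/hi halving loop of Source B
def bsLoop (arr : List Int) (x : Int) (lo hi : Nat) : Nat :=
  if lo < hi then
    let m := (lo + hi) / 2
    if arr.getD m 0 ≤ x then bsLoop arr x (m + 1) hi else bsLoop arr x lo m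
  else lo
termination_by hi - lo
decreasing_by all_goals omega

-- the while loop of Source B, over the precomputed sorted array and suffix sums
def altLoop (arr suf : List Int) (target start end_ : Int) : Option Int :=
  if _h : start ≤ end_ then
    let mid := PySem.Int.floordiv (start + end_) 2
    let lo := bsLoop arr mid 0 arr.length
    let total := suf.getD lo 0 - ((arr.length - lo : Nat) : Int) * mid
    if total = target then some mid
    else if total > target then altLoop arr suf target (mid + 1) end_
    else altLoop arr suf target start (mid - 1)
  else none
termination_by (end_ - start + 1).toNat
decreasing_by
  · have hb := PySem.Int.floordiv_two_mid_bounds _h; omega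
  · have hb := PySem.Int.floordiv_two_mid_bounds _h; omega

def cutting_alt (array : List Int) (target : Int) (start : Int) (end_ : Int) : Option Int :=
  let arr := PySem.List.sorted array (fun x => x) false
  altLoop arr (sufList arr) target start end_

-- ===== PRECONDITION & SPEC =====
def Spec_cutting (array : List Int) (target : Int) (start : Int) (end_ : Int) (out : Option Int) : Prop := out = cutting_alt array target start end_
instance (array : List Int) (target : Int) (start : Int) (end_ : Int) (out : Option Int) : Decidable (Spec_cutting array target start end_ out) := by unfold Spec_cutting; infer_instance

-- ===== CLAIM (what is proved, stated in full; the proofs are below) =====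
def Claim_equal_cutting : Prop := ∀ (array : List Int) (target : Int) (start : Int) (end_ : Int), Dom_cutting array target start end_ → Spec_cutting array target start end_ (cutting array target start end_)

-- ===== LEMMAS AND PROOFS =====

lemma sufList_getD (l : List Int) : ∀ (k : Nat), (sufList l).getD k 0 = (l.drop k).sum := by
  induction l with
  | nil => intro k; cases k <;> simp [sufList]
  | cons a t ih =>
    intro k
    cases k with
    | zero =>
      have hhead : (sufList t).headD 0 = t.sum := by
        cases ht : sufList t with
        | nil => cases t <;> simp [sufList] at ht
        | cons b s => have h0 := ih 0; rw [ht] at h0; simpa using h0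
      simp [sufList, List.headD] at hhead ⊢
      simpa using hhead
    | succ k => simpa [sufList] using ih k

lemma pairwise_getD_mono (arr : List Int) (hs : arr.Pairwise (· ≤ ·))
    {i j : Nat} (hij : i ≤ j) (hj : j < arr.length) :
    arr.getD i 0 ≤ arr.getD j 0 := by
  rcases Nat.lt_or_ge i j with h | h
  · rw [List.getD_eq_getElem arr 0 (by omega), List.getD_eq_getElem arr 0 hj]
    exact List.pairwise_iff_getElem.mp hs i j (by omega) hj h
  · have : i = j := by omega
    subst this; exact le_refl _

lemma bsLoop_spec (arr : List Int) (x : Int) (hs : arr.Pairwise (· ≤ ·)) :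
    ∀ (fuel lo hi : Nat), hi - lo ≤ fuel → lo ≤ hi → hi ≤ arr.length →
    (∀ j, j < lo → arr.getD j 0 ≤ x) →
    (∀ j, hi ≤ j → j < arr.length → x < arr.getD j 0) →
    bsLoop arr x lo hi ≤ arr.length ∧
    (∀ j, j < bsLoop arr x lo hi → arr.getD j 0 ≤ x) ∧
    (∀ j, bsLoop arr x lo hi ≤ j → j < arr.length → x < arr.getD j 0) := by
  intro fuel
  induction fuel with
  | zero =>
    intro lo hi hf hlh hhn hlow hhigh
    rw [bsLoop]
    have hlt : ¬ lo < hi := by omega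
    simp only [hlt, if_false]
    exact ⟨by omega, fun j hj => hlow j hj, fun j hj hjn => hhigh j (by omega) hjn⟩
  | succ f ih =>
    intro lo hi hf hlh hhn hlow hhigh
    rw [bsLoop]
    by_cases hlt : lo < hi
    · simp only [hlt, if_true]
      by_cases hc : arr.getD ((lo + hi) / 2) 0 ≤ x
      · simp only [hc, if_true]
        refine ih ((lo + hi) / 2 + 1) hi (by omega) (by omega) hhn ?_ hhigh
        intro j hj
        exact le_trans (pairwise_getD_mono arr hs (by omega) (by omega)) hc
      · simp only [hc, if_false]
        refine ih lo ((lo + hi) / 2) (by omega) (by omega) (by omega) hlow ?_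
        intro j hj hjn
        exact lt_of_lt_of_le (not_le.mp hc) (pairwise_getD_mono arr hs hj hjn)
    · simp only [hlt, if_false]
      exact ⟨by omega, fun j hj => hlow j hj, fun j hj hjn => hhigh j (by omega) hjn⟩

lemma foldl_cut_eq_sum (mid : Int) :
    ∀ (l : List Int) (a : Int),
    l.foldl (fun t i => if i > mid then t + (i - mid) else t) a
      = a + (l.map (fun i => if mid < i then i - mid else 0)).sum := by
  intro l
  induction l with
  | nil => intro a; simp
  | cons b t ih =>
    intro a
    simp only [List.foldl_cons, List.map_cons, List.sum_cons]
    by_cases h : b > mid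
    · rw [ih]; simp [h]; ring
    · rw [ih]; simp [h]

lemma sum_cut_all_le (mid : Int) :
    ∀ (l : List Int), (∀ i ∈ l, i ≤ mid) →
    (l.map (fun i => if mid < i then i - mid else 0)).sum = 0 := by
  intro l
  induction l with
  | nil => intro _; simp
  | cons b t ih =>
    intro h
    have hb : ¬ mid < b := not_lt.mpr (h b (by simp))
    simp only [List.map_cons, List.sum_cons, hb, if_false]
    rw [ih (fun i hi => h i (by simp [hi]))]; ring

lemma sum_cut_all_gt (mid : Int) :
    ∀ (l : List Int), (∀ i ∈ l, mid < i) →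
    (l.map (fun i => if mid < i then i - mid else 0)).sum = l.sum - (l.length : Int) * mid := by
  intro l
  induction l with
  | nil => intro _; simp
  | cons b t ih =>
    intro h
    have hb : mid < b := h b (by simp)
    simp only [List.map_cons, List.sum_cons, hb, if_true, List.length_cons]
    rw [ih (fun i hi => h i (by simp [hi]))]
    push_cast; ring

-- A's per-probe total equals B's suffix-sum/bisection total, for every mid.
lemma total_eq (array : List Int) (mid : Int) :
    array.foldl (fun t i => if i > mid then t + (i - mid) else t) 0
      = (sufList (PySem.List.sorted array (fun x => x) false)).getD
          (bsLoop (PySem.List.sorted array (fun x => x) false) mid 0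
            (PySem.List.sorted array (fun x => x) false).length) 0
        - (((PySem.List.sorted array (fun x => x) false).length
            - bsLoop (PySem.List.sorted array (fun x => x) false) mid 0
                (PySem.List.sorted array (fun x => x) false).length : Nat) : Int) * mid := by
  set s := PySem.List.sorted array (fun x => x) false with hsdef
  have hperm : s.Perm array := PySem.List.sorted_perm array (fun x => x) false
  have hpw : s.Pairwise (· ≤ ·) := PySem.List.sorted_pairwise array (fun x => x)
  set r := bsLoop s mid 0 s.length with hrdef
  obtain ⟨hr_le, hlow, hhigh⟩ :=
    bsLoop_spec s mid hpw s.length 0 s.length (by omega) (by omega) (le_refl _)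
      (fun j hj => absurd hj (by omega)) (fun j hj hjn => absurd hjn (by omega))
  rw [foldl_cut_eq_sum, zero_add]
  have hmapperm : (array.map (fun i => if mid < i then i - mid else 0)).Perm
      (s.map (fun i => if mid < i then i - mid else 0)) := (hperm.map _).symm
  rw [hmapperm.sum_eq]
  have hsplit : s = s.take r ++ s.drop r := (List.take_append_drop r s).symm
  have htake : ∀ i ∈ s.take r, i ≤ mid := by
    intro i hi
    obtain ⟨j, hj, hje⟩ := List.mem_iff_getElem.mp hi
    have hjr : j < r := by have := List.length_take_le r s; omega
    have hjs : j < s.length := by omega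
    have : (s.take r)[j] = s[j] := List.getElem_take
    rw [this] at hje
    have := hlow j hjr
    rwa [List.getD_eq_getElem s 0 hjs, hje] at this
  have hdrop : ∀ i ∈ s.drop r, mid < i := by
    intro i hi
    obtain ⟨j, hj, hje⟩ := List.mem_iff_getElem.mp hi
    have hjs : r + j < s.length := by
      have := List.length_drop (l := s) (i := r); omega
    have : (s.drop r)[j] = s[r + j] := List.getElem_drop
    rw [this] at hje
    have := hhigh (r + j) (by omega) hjs
    rwa [List.getD_eq_getElem s 0 hjs, hje] at this
  conv_lhs => rw [hsplit]
  rw [List.map_append, List.sum_append, sum_cut_all_le mid _ htake,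
      sum_cut_all_gt mid _ hdrop, sufList_getD, List.length_drop]
  ring

-- the two search loops coincide once the per-probe totals coincide
lemma loop_eq (array : List Int) :
    ∀ (fuel : Nat) (target start end_ : Int), (end_ - start + 1).toNat ≤ fuel →
    cutting array target start end_
      = altLoop (PySem.List.sorted array (fun x => x) false)
          (sufList (PySem.List.sorted array (fun x => x) false)) target start end_ := by
  intro fuel
  induction fuel with
  | zero =>
    intro target start end_ hf
    have h : ¬ start ≤ end_ := by omega
    rw [cutting, altLoop]
    simp [h]
  | succ f ih =>
    intro target start end_ hf
    rw [cutting, altLoop]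
    by_cases h : start ≤ end_
    · simp only [h, dif_pos]
      have hb := PySem.Int.floordiv_two_mid_bounds h
      set mid := PySem.Int.floordiv (start + end_) 2 with hmid
      rw [total_eq array mid]
      split_ifs with h1 h2
      · rfl
      · exact ih target (mid + 1) end_ (by omega)
      · exact ih target start (mid - 1) (by omega)
    · simp [h]

-- ===== VERDICT (by name: the statement is the Claim_ definition above) =====
theorem cutting_spec : Claim_equal_cutting := by
  intro array target start end_ _
  unfold Spec_cutting cutting_alt
  exact loop_eq array (end_ - start + 1).toNat target start end_ (le_refl _)
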